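-- pv_equiv track=rewrite | github.com/DIG-Network/proof_research | sub-problems/anonymous-quorum-binding/experiments/joint-min-max-sum-product-quadruple-square-weights-extended-n-scan/script.py | cross_shell_collision_at_n
-- ===== SOURCE A (Python) =====
-- from itertools import combinations
-- from math import prod
-- from typing import Tuple
--
-- def quad(ws: list[int], subset: tuple[int, ...]) -> tuple[int, int, int, int]:
--     vals = [ws[i] for i in subset]
--     return (min(vals), max(vals), sum(vals), prod(vals))
--
-- def cross_shell_collision_at_n(
--     ws: list[int],
-- ) -> Tuple[
--     bool,
--     tuple[int, int, int, int] | None,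
--     tuple[int, ...] | None,
--     tuple[int, ...] | None,
-- ]:
--     n = len(ws)
--     k_to_5: dict[tuple[int, int, int, int], tuple[int, ...]] = {}
--     k_to_6: dict[tuple[int, int, int, int], tuple[int, ...]] = {}
--     for comb5 in combinations(range(n), 5):
--         k = quad(ws, comb5)
--         k_to_5.setdefault(k, comb5)
--     for comb6 in combinations(range(n), 6):
--         k = quad(ws, comb6)
--         k_to_6.setdefault(k, comb6)
--     inter = set(k_to_5) & set(k_to_6)
--     if not inter:
--         return False, None, None, None
--     k = min(inter)
--     return True, k, k_to_5[k], k_to_6[k]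
-- ===== SOURCE B (Python) =====
-- from itertools import combinations
-- from math import prod
-- from operator import itemgetter
--
--
-- def quad(ws, subset):
--     vals = [ws[i] for i in subset]
--     return (min(vals), max(vals), sum(vals), prod(vals))
--
--
-- def cross_shell_collision_at_n(ws):
--     # Sort-merge join instead of hash dicts: sort the (key, combo) pairs of each
--     # shell by key (stable, so the first pair of each key block is the first combo
--     # in generation order), then find the smallest common key with a two-pointer
--     # merge of the two sorted lists.
--     n = len(ws)
--     pairs5 = sorted(((quad(ws, c), c) for c in combinations(range(n), 5)),
--                     key=itemgetter(0))
--     pairs6 = sorted(((quad(ws, c), c) for c in combinations(range(n), 6)),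
--                     key=itemgetter(0))
--     i = j = 0
--     while i < len(pairs5) and j < len(pairs6):
--         k5, c5 = pairs5[i]
--         k6, c6 = pairs6[j]
--         if k5 == k6:
--             return True, k5, c5, c6
--         if k5 < k6:
--             i += 1
--         else:
--             j += 1
--     return False, None, None, None
-- ===== Notes on version B (the rewrite author's own statement) =====
-- stated objective: alternative
-- what changed: A's hash-join (two key->combo dicts, set intersection, min over the intersection) is replaced by a sort-merge join: the (key, combo) pairs of each shell are stably sorted by key and a two-pointer merge of the two sorted lists finds the smallest common key and its first combos.
import Mathlib
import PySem

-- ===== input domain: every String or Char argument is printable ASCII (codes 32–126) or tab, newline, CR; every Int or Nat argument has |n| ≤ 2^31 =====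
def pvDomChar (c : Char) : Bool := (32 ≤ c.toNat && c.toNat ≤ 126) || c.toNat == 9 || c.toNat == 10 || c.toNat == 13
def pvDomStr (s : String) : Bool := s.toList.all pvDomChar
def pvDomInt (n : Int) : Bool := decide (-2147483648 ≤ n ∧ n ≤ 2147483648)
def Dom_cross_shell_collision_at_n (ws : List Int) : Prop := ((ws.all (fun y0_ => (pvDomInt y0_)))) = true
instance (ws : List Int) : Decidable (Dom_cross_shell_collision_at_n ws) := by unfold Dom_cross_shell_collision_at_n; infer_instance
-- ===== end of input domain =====

-- B replaces A's hash-join (two dicts, set intersection, min over it) by a sort-merge join: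
-- stable sort of each shell's (key, combo) pairs by key, then a two-pointer merge
-- (objective: alternative; not claimed faster).


-- ===== PORT A =====
-- Python's '<' on 4-tuples of ints is lexicographic: the lexicographic order on Int ×ₗ … (Prod.Lex).
def toLex4 (a : Int × Int × Int × Int) : Int ×ₗ (Int ×ₗ (Int ×ₗ Int)) :=
  toLex (a.1, toLex (a.2.1, toLex (a.2.2.1, a.2.2.2)))

-- quad(ws, subset); the indices come from combinations(range(len(ws)), r), hence are in range,
-- so ws[i] never raises (the getD default is unreachable) and vals is nonempty for r = 5, 6.
def pvQuad (ws : List Int) (subset : List Int) : Int × Int × Int × Int :=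
  let vals := subset.map (fun i => PySem.List.pyGetD ws i 0)
  ((PySem.List.min? vals (fun x => x)).getD 0, (PySem.List.max? vals (fun x => x)).getD 0,
   vals.sum, vals.foldl (· * ·) 1)

def cross_shell_collision_at_n (ws : List Int) :
    Bool × (Option (Int × Int × Int × Int)) × Option (List Int) × Option (List Int) :=
  let n : Int := ws.length
  let idx := PySem.List.pyRange 0 n 1
  let k_to_5 := (PySem.List.combinations idx 5).foldl
      (fun d c => d.setdefault (pvQuad ws c) c)
      (PySem.Dict.empty : PySem.Dict (Int × Int × Int × Int) (List Int))
  let k_to_6 := (PySem.List.combinations idx 6).foldl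
      (fun d c => d.setdefault (pvQuad ws c) c)
      (PySem.Dict.empty : PySem.Dict (Int × Int × Int × Int) (List Int))
  -- set(k_to_5) & set(k_to_6): dict keys are distinct, so the filtered key list IS that set;
  -- min over a Python set is iteration-order independent (total order), ported as a running min.
  let inter := k_to_5.keys.filter (fun k => k_to_6.contains k)
  match inter with
  | [] => (false, none, none, none)
  | k0 :: rest =>
    let kmin := rest.foldl (fun a b => if toLex4 b < toLex4 a then b else a) k0
    (true, some kmin, k_to_5.get? kmin, k_to_6.get? kmin)

-- ===== PORT B =====
-- the two-pointer merge loop of Source B, on the suffixes the indices i, j point at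
def pvMerge : List ((Int × Int × Int × Int) × List Int) → List ((Int × Int × Int × Int) × List Int) →
    Bool × (Option (Int × Int × Int × Int)) × Option (List Int) × Option (List Int)
  | [], _ => (false, none, none, none)
  | _ :: _, [] => (false, none, none, none)
  | (k5, c5) :: t5, (k6, c6) :: t6 =>
    if k5 = k6 then (true, some k5, some c5, some c6)
    else if toLex4 k5 < toLex4 k6 then pvMerge t5 ((k6, c6) :: t6)
    else pvMerge ((k5, c5) :: t5) t6
termination_by l5 l6 => l5.length + l6.length

def cross_shell_collision_at_n_alt (ws : List Int) :
    Bool × (Option (Int × Int × Int × Int)) × Option (List Int) × Option (List Int) :=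
  let n : Int := ws.length
  let idx := PySem.List.pyRange 0 n 1
  let pairs5 := PySem.List.sorted
      ((PySem.List.combinations idx 5).map (fun c => (pvQuad ws c, c))) (fun p => toLex4 p.1)
  let pairs6 := PySem.List.sorted
      ((PySem.List.combinations idx 6).map (fun c => (pvQuad ws c, c))) (fun p => toLex4 p.1)
  pvMerge pairs5 pairs6

-- ===== PRECONDITION & SPEC =====
def Spec_cross_shell_collision_at_n (ws : List Int) (out : Bool × (Option (Int × Int × Int × Int)) × Option (List Int) × Option (List Int)) : Prop := out = cross_shell_collision_at_n_alt ws
instance (ws : List Int) (out : Bool × (Option (Int × Int × Int × Int)) × Option (List Int) × Option (List Int)) : Decidable (Spec_cross_shell_collision_at_n ws out) := by unfold Spec_cross_shell_collision_at_n; infer_instance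

-- ===== CLAIM (what is proved, stated in full; the proofs are below) =====
def Claim_equal_cross_shell_collision_at_n : Prop := ∀ (ws : List Int), Dom_cross_shell_collision_at_n ws → Spec_cross_shell_collision_at_n ws (cross_shell_collision_at_n ws)

-- ===== LEMMAS AND PROOFS =====

theorem toLex4_inj {a b : Int × Int × Int × Int} (h : toLex4 a = toLex4 b) : a = b := by
  obtain ⟨a1, a2, a3, a4⟩ := a; obtain ⟨b1, b2, b3, b4⟩ := b
  simp [toLex4, Prod.mk.injEq] at h
  simp [h]

-- proof-side names for the shared pieces (the ports spell them out)
def pvL5 (ws : List Int) : List (List Int) :=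
  PySem.List.combinations (PySem.List.pyRange 0 (ws.length : Int) 1) 5

def pvL6 (ws : List Int) : List (List Int) :=
  PySem.List.combinations (PySem.List.pyRange 0 (ws.length : Int) 1) 6

def pvD5 (ws : List Int) : PySem.Dict (Int × Int × Int × Int) (List Int) :=
  (pvL5 ws).foldl (fun d c => d.setdefault (pvQuad ws c) c) PySem.Dict.empty

def pvD6 (ws : List Int) : PySem.Dict (Int × Int × Int × Int) (List Int) :=
  (pvL6 ws).foldl (fun d c => d.setdefault (pvQuad ws c) c) PySem.Dict.empty

def pvS5 (ws : List Int) : List ((Int × Int × Int × Int) × List Int) :=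
  PySem.List.sorted ((pvL5 ws).map (fun c => (pvQuad ws c, c))) (fun p => toLex4 p.1)

def pvS6 (ws : List Int) : List ((Int × Int × Int × Int) × List Int) :=
  PySem.List.sorted ((pvL6 ws).map (fun c => (pvQuad ws c, c))) (fun p => toLex4 p.1)

-- a setdefault-loop's lookup is the first list element with that key (or the start dict's value)
theorem get?_setdefault_fold (ws : List Int) (L : List (List Int))
    (d : PySem.Dict (Int × Int × Int × Int) (List Int)) (k : Int × Int × Int × Int) :
    (L.foldl (fun d c => d.setdefault (pvQuad ws c) c) d).get? k
      = match d.get? k with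
        | some v => some v
        | none => L.find? (fun c => pvQuad ws c == k) := by
  induction L generalizing d with
  | nil => cases h : d.get? k <;> simp only [List.foldl_nil, h, List.find?_nil]
  | cons c L ih =>
    rw [List.foldl_cons, ih]
    by_cases hk : pvQuad ws c = k
    · subst hk
      rw [PySem.Dict.get?_setdefault_self]
      cases h : d.get? (pvQuad ws c) <;> simp
    · rw [PySem.Dict.get?_setdefault_of_ne _ _ (Ne.symm hk)]
      have hb : (pvQuad ws c == k) = false := beq_eq_false_iff_ne.mpr hk
      cases d.get? k
      · simp [hb]
      · simp

theorem hd5get (ws : List Int) (k : Int × Int × Int × Int) :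
    (pvD5 ws).get? k = (pvL5 ws).find? (fun c => pvQuad ws c == k) := by
  rw [pvD5, get?_setdefault_fold]; simp

theorem hd6get (ws : List Int) (k : Int × Int × Int × Int) :
    (pvD6 ws).get? k = (pvL6 ws).find? (fun c => pvQuad ws c == k) := by
  rw [pvD6, get?_setdefault_fold]; simp

theorem hmemI (ws : List Int) (k : Int × Int × Int × Int) :
    k ∈ (pvD5 ws).keys.filter (fun k => (pvD6 ws).contains k)
      ↔ ((∃ c ∈ pvL5 ws, pvQuad ws c = k) ∧ ∃ c ∈ pvL6 ws, pvQuad ws c = k) := by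
  rw [List.mem_filter, ← PySem.Dict.contains_iff_mem_keys,
      PySem.Dict.contains_eq_isSome_get? (pvD5 ws), PySem.Dict.contains_eq_isSome_get? (pvD6 ws),
      hd5get, hd6get, List.find?_isSome, List.find?_isSome]
  simp [beq_iff_eq]

-- sorted pair lists: members are exactly the (quad, combo) pairs of the combo list
theorem mem_pvS5 (ws : List Int) (p : (Int × Int × Int × Int) × List Int) :
    p ∈ pvS5 ws ↔ ∃ c ∈ pvL5 ws, p = (pvQuad ws c, c) := by
  rw [pvS5, PySem.List.mem_sorted, List.mem_map]
  constructor
  · rintro ⟨c, hc, rfl⟩; exact ⟨c, hc, rfl⟩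
  · rintro ⟨c, hc, rfl⟩; exact ⟨c, hc, rfl⟩

theorem mem_pvS6 (ws : List Int) (p : (Int × Int × Int × Int) × List Int) :
    p ∈ pvS6 ws ↔ ∃ c ∈ pvL6 ws, p = (pvQuad ws c, c) := by
  rw [pvS6, PySem.List.mem_sorted, List.mem_map]
  constructor
  · rintro ⟨c, hc, rfl⟩; exact ⟨c, hc, rfl⟩
  · rintro ⟨c, hc, rfl⟩; exact ⟨c, hc, rfl⟩

-- inserting an element not satisfying q does not change which element find? returns
theorem find?_insertBy_of_neg {α : Type} (before : α → α → Bool) (x : α) (l : List α)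
    (q : α → Bool) (hx : q x = false) :
    (PySem.List.insertBy before x l).find? q = l.find? q := by
  induction l with
  | nil => simp [PySem.List.insertBy, List.find?, hx]
  | cons y ys ih =>
    by_cases hb : before x y = true
    · simp [PySem.List.insertBy, hb, List.find?, hx]
    · simp only [Bool.not_eq_true] at hb
      cases hq : q y <;> simp [PySem.List.insertBy, hb, List.find?, hq, ih]

-- stable insertion of x into a key-sorted list, for a predicate q that singles out one key
-- carried by x: the first q-element is the old one if there was one, else x
theorem find?_insertBy_key {α κ : Type} [LinearOrder κ] (key : α → κ) (x : α) (l : List α)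
    (q : α → Bool) (hqx : q x = true) (hkey : ∀ z, q z = true → key z = key x)
    (hl : l.Pairwise (fun a b => key a ≤ key b)) :
    (PySem.List.insertBy (fun a b => decide (key a < key b)) x l).find? q
      = match l.find? q with
        | some v => some v
        | none => some x := by
  induction l with
  | nil => simp [PySem.List.insertBy, List.find?, hqx]
  | cons y ys ih =>
    rcases List.pairwise_cons.mp hl with ⟨hy, hys⟩
    by_cases hb : key x < key y
    · -- x goes in front; nothing in y :: ys can satisfy q
      have hnone : (y :: ys).find? q = none := by
        apply List.find?_eq_none.mpr
        intro z hz hq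
        have h1 : key x < key z := by
          rcases List.mem_cons.mp hz with rfl | hz'
          · exact hb
          · exact lt_of_lt_of_le hb (hy z hz')
        rw [hkey z hq] at h1
        exact absurd h1 (lt_irrefl _)
      simp only [PySem.List.insertBy, decide_eq_true_eq, if_pos hb, hnone]
      simp [List.find?, hqx]
    · simp only [PySem.List.insertBy, decide_eq_true_eq, if_neg hb]
      cases hq : q y <;> simp [List.find?, hq, ih hys]

-- stability of PySem's sort: for a predicate q all of whose witnesses share one key,
-- the first q-element of the sorted list is the first q-element of the original list
theorem find?_sorted_key {α κ : Type} [LinearOrder κ] (xs : List α) (key : α → κ)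
    (q : α → Bool) (hq1 : ∀ a b, q a = true → q b = true → key a = key b) :
    (PySem.List.sorted xs key).find? q = xs.find? q := by
  induction xs using List.reverseRecOn with
  | nil => simp [PySem.List.sorted_eq_foldl_insertBy]
  | append_singleton xs x ih =>
    have hsplit : PySem.List.sorted (xs ++ [x]) key
        = PySem.List.insertBy (fun a b => decide (key a < key b)) x (PySem.List.sorted xs key) := by
      rw [PySem.List.sorted_eq_foldl_insertBy, PySem.List.sorted_eq_foldl_insertBy,
          List.foldl_append]
      rfl
    rw [hsplit]
    cases hx : q x with
    | true =>
      rw [find?_insertBy_key key x _ q hx (fun z hz => hq1 z x hz hx)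
            (PySem.List.sorted_pairwise xs key), ih]
      cases h : xs.find? q <;> simp [List.find?_append, h, List.find?, hx]
    | false =>
      rw [find?_insertBy_of_neg (fun a b => decide (key a < key b)) x
            (PySem.List.sorted xs key) q hx, ih]
      simp [List.find?_append, List.find?, hx]

-- merge of key-disjoint lists finds nothing
theorem merge_none (l5 l6 : List ((Int × Int × Int × Int) × List Int))
    (h : ∀ p ∈ l5, ∀ q ∈ l6, p.1 ≠ q.1) :
    pvMerge l5 l6 = (false, none, none, none) := by
  induction l5, l6 using pvMerge.induct with
  | case1 l6 => rw [pvMerge]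
  | case2 p t5 => rw [pvMerge]
  | case3 c5 t5 k6 c6 t6 =>
    exact absurd rfl (h (k6, c5) List.mem_cons_self (k6, c6) List.mem_cons_self)
  | case4 k5 c5 t5 k6 c6 t6 hne hlt ih =>
    rw [pvMerge, if_neg hne, if_pos hlt]
    exact ih (fun p hp q hq => h p (List.mem_cons_of_mem _ hp) q hq)
  | case5 k5 c5 t5 k6 c6 t6 hne hlt ih =>
    rw [pvMerge, if_neg hne, if_neg hlt]
    exact ih (fun p hp q hq => h p hp q (List.mem_cons_of_mem _ hq))

-- merge of two key-sorted lists with common key k, k minimal among common keys: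
-- it returns k with the first pair of each list carrying k
theorem merge_found (l5 l6 : List ((Int × Int × Int × Int) × List Int))
    (h5 : l5.Pairwise (fun a b => toLex4 a.1 ≤ toLex4 b.1))
    (h6 : l6.Pairwise (fun a b => toLex4 a.1 ≤ toLex4 b.1))
    (k : Int × Int × Int × Int)
    (hm5 : ∃ p ∈ l5, p.1 = k) (hm6 : ∃ q ∈ l6, q.1 = k)
    (hmin : ∀ p ∈ l5, ∀ q ∈ l6, p.1 = q.1 → toLex4 k ≤ toLex4 p.1) :
    pvMerge l5 l6 = (true, some k,
      (l5.find? (fun p => p.1 == k)).map (·.2), (l6.find? (fun p => p.1 == k)).map (·.2)) := by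
  induction l5, l6 using pvMerge.induct with
  | case1 l6 => obtain ⟨p, hp, _⟩ := hm5; cases hp
  | case2 p t5 => obtain ⟨q, hq, _⟩ := hm6; cases hq
  | case3 c5 t5 k6 c6 t6 =>
    -- heads have equal keys; k must be that key
    have hk5k : toLex4 k6 ≤ toLex4 k := by
      obtain ⟨p, hp, rfl⟩ := hm5
      rcases List.mem_cons.mp hp with rfl | hp'
      · exact le_refl _
      · exact (List.pairwise_cons.mp h5).1 p hp'
    have hkk5 : toLex4 k ≤ toLex4 k6 :=
      hmin (k6, c5) List.mem_cons_self (k6, c6) List.mem_cons_self rfl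
    have hk : k = k6 := toLex4_inj (le_antisymm hk5k hkk5).symm
    subst hk
    rw [pvMerge, if_pos rfl]
    simp
  | case4 k5 c5 t5 k6 c6 t6 hne hlt ih =>
    -- k5 < k6 ≤ every key of l6 ∋ k, so k5 ≠ k and the head of l5 is irrelevant
    have hk6k : toLex4 k6 ≤ toLex4 k := by
      obtain ⟨q, hq, rfl⟩ := hm6
      rcases List.mem_cons.mp hq with rfl | hq'
      · exact le_refl _
      · exact (List.pairwise_cons.mp h6).1 q hq'
    have hk5ne : k5 ≠ k := by
      intro h
      exact absurd (lt_of_lt_of_le hlt hk6k) (h ▸ lt_irrefl _)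
    have hm5' : ∃ p ∈ t5, p.1 = k := by
      obtain ⟨p, hp, rfl⟩ := hm5
      rcases List.mem_cons.mp hp with rfl | hp'
      · exact absurd rfl hk5ne
      · exact ⟨p, hp', rfl⟩
    have hf : List.find? (fun p => p.1 == k) ((k5, c5) :: t5)
        = List.find? (fun p => p.1 == k) t5 := List.find?_cons_of_neg (by simp [hk5ne])
    rw [pvMerge, if_neg hne, if_pos hlt,
        ih (List.pairwise_cons.mp h5).2 h6 hm5' hm6
          (fun p hp q hq h => hmin p (List.mem_cons_of_mem _ hp) q hq h), hf]
  | case5 k5 c5 t5 k6 c6 t6 hne hlt ih =>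
    have hlt' : toLex4 k6 < toLex4 k5 := by
      rcases lt_trichotomy (toLex4 k5) (toLex4 k6) with h | h | h
      · exact absurd h hlt
      · exact absurd (toLex4_inj h) hne
      · exact h
    have hk5k : toLex4 k5 ≤ toLex4 k := by
      obtain ⟨p, hp, rfl⟩ := hm5
      rcases List.mem_cons.mp hp with rfl | hp'
      · exact le_refl _
      · exact (List.pairwise_cons.mp h5).1 p hp'
    have hk6ne : k6 ≠ k := by
      intro h
      exact absurd (lt_of_lt_of_le hlt' hk5k) (h ▸ lt_irrefl _)
    have hm6' : ∃ q ∈ t6, q.1 = k := by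
      obtain ⟨q, hq, rfl⟩ := hm6
      rcases List.mem_cons.mp hq with rfl | hq'
      · exact absurd rfl hk6ne
      · exact ⟨q, hq', rfl⟩
    have hf : List.find? (fun p => p.1 == k) ((k6, c6) :: t6)
        = List.find? (fun p => p.1 == k) t6 := List.find?_cons_of_neg (by simp [hk6ne])
    rw [pvMerge, if_neg hne, if_neg hlt,
        ih h5 (List.pairwise_cons.mp h6).2 hm5 hm6'
          (fun p hp q hq h => hmin p hp q (List.mem_cons_of_mem _ hq) h), hf]

-- A's running min over the intersection list
theorem minfold_char (rest : List (Int × Int × Int × Int)) (k0 : Int × Int × Int × Int) :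
    (rest.foldl (fun a b => if toLex4 b < toLex4 a then b else a) k0) ∈ k0 :: rest
      ∧ ∀ x ∈ k0 :: rest,
          toLex4 (rest.foldl (fun a b => if toLex4 b < toLex4 a then b else a) k0) ≤ toLex4 x := by
  induction rest generalizing k0 with
  | nil => simp
  | cons b rest ih =>
    rw [List.foldl_cons]
    by_cases hb : toLex4 b < toLex4 k0
    · rw [if_pos hb]
      obtain ⟨hmem, hmin⟩ := ih b
      refine ⟨List.mem_cons_of_mem _ hmem, ?_⟩
      intro x hx
      rcases List.mem_cons.mp hx with rfl | hx'
      · exact le_trans (hmin b List.mem_cons_self) (le_of_lt hb)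
      · exact hmin x hx'
    · rw [if_neg hb]
      obtain ⟨hmem, hmin⟩ := ih k0
      refine ⟨?_, ?_⟩
      · rcases List.mem_cons.mp hmem with h | h
        · rw [h]; exact List.mem_cons_self
        · exact List.mem_cons_of_mem _ (List.mem_cons_of_mem _ h)
      · intro x hx
        rcases List.mem_cons.mp hx with rfl | hx'
        · exact hmin _ List.mem_cons_self
        · rcases List.mem_cons.mp hx' with rfl | hx''
          · exact le_trans (hmin _ List.mem_cons_self) (not_lt.mp hb)
          · exact hmin x (List.mem_cons_of_mem _ hx'')

-- the ports, written with the proof-side names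
theorem hA_shape (ws : List Int) :
    cross_shell_collision_at_n ws =
      (match (pvD5 ws).keys.filter (fun k => (pvD6 ws).contains k) with
       | [] => (false, none, none, none)
       | k0 :: rest =>
         (true, some (rest.foldl (fun a b => if toLex4 b < toLex4 a then b else a) k0),
          (pvD5 ws).get? (rest.foldl (fun a b => if toLex4 b < toLex4 a then b else a) k0),
          (pvD6 ws).get? (rest.foldl (fun a b => if toLex4 b < toLex4 a then b else a) k0))) := rfl

theorem hB_shape (ws : List Int) :
    cross_shell_collision_at_n_alt ws = pvMerge (pvS5 ws) (pvS6 ws) := rfl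

-- find?_sorted_key specialised to the pair lists and the key-equality test 'p.1 == k'
theorem find?_sorted_pairs (xs : List ((Int × Int × Int × Int) × List Int))
    (k : Int × Int × Int × Int) :
    (PySem.List.sorted xs (fun p => toLex4 p.1)).find? (fun p => p.1 == k)
      = xs.find? (fun p => p.1 == k) := by
  apply find?_sorted_key xs (fun p => toLex4 p.1) (fun p => p.1 == k)
  intro a b ha hb
  rw [beq_iff_eq.mp ha, beq_iff_eq.mp hb]

-- B's find? over the sorted pairs is A's dict lookup
theorem find?_pvS5 (ws : List Int) (k : Int × Int × Int × Int) :
    (pvS5 ws).find? (fun p => p.1 == k) = ((pvD5 ws).get? k).map (fun c => (pvQuad ws c, c)) := by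
  rw [pvS5, find?_sorted_pairs, List.find?_map, hd5get]
  rfl

theorem find?_pvS6 (ws : List Int) (k : Int × Int × Int × Int) :
    (pvS6 ws).find? (fun p => p.1 == k) = ((pvD6 ws).get? k).map (fun c => (pvQuad ws c, c)) := by
  rw [pvS6, find?_sorted_pairs, List.find?_map, hd6get]
  rfl

theorem both_eq (ws : List Int) :
    cross_shell_collision_at_n ws = cross_shell_collision_at_n_alt ws := by
  rw [hA_shape, hB_shape]
  cases hI : (pvD5 ws).keys.filter (fun k => (pvD6 ws).contains k) with
  | nil =>
    -- no common key at all
    have hdisj : ∀ p ∈ pvS5 ws, ∀ q ∈ pvS6 ws, p.1 ≠ q.1 := by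
      intro p hp q hq hpq
      obtain ⟨c5, hc5, rfl⟩ := (mem_pvS5 ws p).mp hp
      obtain ⟨c6, hc6, rfl⟩ := (mem_pvS6 ws q).mp hq
      have : pvQuad ws c5 ∈ (pvD5 ws).keys.filter (fun k => (pvD6 ws).contains k) :=
        (hmemI ws _).mpr ⟨⟨c5, hc5, rfl⟩, ⟨c6, hc6, hpq.symm⟩⟩
      rw [hI] at this
      cases this
    rw [merge_none _ _ hdisj]
  | cons k0 rest =>
    dsimp only
    obtain ⟨hkmem, hkmin⟩ := minfold_char rest k0
    set kmin := rest.foldl (fun a b => if toLex4 b < toLex4 a then b else a) k0 with hkm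
    have hkI : kmin ∈ (pvD5 ws).keys.filter (fun k => (pvD6 ws).contains k) := by
      rw [hI]; exact hkmem
    obtain ⟨⟨c5, hc5, hc5q⟩, c6, hc6, hc6q⟩ := (hmemI ws kmin).mp hkI
    rw [merge_found (pvS5 ws) (pvS6 ws)
          (PySem.List.sorted_pairwise _ _) (PySem.List.sorted_pairwise _ _) kmin
          ⟨(pvQuad ws c5, c5), (mem_pvS5 ws _).mpr ⟨c5, hc5, rfl⟩, hc5q⟩
          ⟨(pvQuad ws c6, c6), (mem_pvS6 ws _).mpr ⟨c6, hc6, rfl⟩, hc6q⟩ ?_,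
        find?_pvS5, find?_pvS6]
    · -- the two lookups' .2-projections are the dict lookups
      cases (pvD5 ws).get? kmin <;> cases (pvD6 ws).get? kmin <;> simp
    · -- minimality of kmin among common keys
      intro p hp q hq hpq
      obtain ⟨a5, ha5, rfl⟩ := (mem_pvS5 ws p).mp hp
      obtain ⟨a6, ha6, rfl⟩ := (mem_pvS6 ws q).mp hq
      have : pvQuad ws a5 ∈ (pvD5 ws).keys.filter (fun k => (pvD6 ws).contains k) :=
        (hmemI ws _).mpr ⟨⟨a5, ha5, rfl⟩, ⟨a6, ha6, hpq.symm⟩⟩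
      rw [hI] at this
      exact hkmin _ this

-- ===== VERDICT (by name: the statement is the Claim_ definition above) =====
theorem cross_shell_collision_at_n_spec : Claim_equal_cross_shell_collision_at_n := by
  intro ws _
  unfold Spec_cross_shell_collision_at_n
  exact both_eq ws
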